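-- pv_equiv track=rewrite | github.com/Daba-byte/SWEA | IM대비/20739_고대유적2.py | find_longest_structure
-- ===== SOURCE A (Python) =====
-- def find_longest_structure(n, m, grid):
--     max_length = 0
--
--     # 행을 순회하며 최대 길이 찾기
--     for i in range(n):
--         current_length = 0
--         for j in range(m):
--             if grid[i][j] == 1:
--                 current_length += 1
--             else:
--                 if current_length >= 2:  # 1x1은 노이즈이므로 최소 길이가 2 이상일 때만 고려
--                     max_length = max(max_length, current_length)
--                 current_length = 0
--         if current_length >= 2:  # 행의 마지막이 연속된 '1'로 끝나는 경우
--             max_length = max(max_length, current_length)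
--
--     # 열을 순회하며 최대 길이 찾기
--     for j in range(m):
--         current_length = 0
--         for i in range(n):
--             if grid[i][j] == 1:
--                 current_length += 1
--             else:
--                 if current_length >= 2:
--                     max_length = max(max_length, current_length)
--                 current_length = 0
--         if current_length >= 2:  # 열의 마지막이 연속된 '1'로 끝나는 경우
--             max_length = max(max_length, current_length)
--
--     return max_length
-- ===== SOURCE B (Python) =====
-- def _runs(seq):
--     # lengths of maximal runs of 1s, found by jumping run-to-run (two pointers)
--     out = []
--     i = 0
--     L = len(seq)
--     while i < L:
--         if seq[i] == 1:
--             j = i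
--             while j < L and seq[j] == 1:
--                 j += 1
--             out.append(j - i)
--             i = j
--         else:
--             i += 1
--     return out
--
--
-- def find_longest_structure(n, m, grid):
--     if n <= 0 or m <= 0:
--         return 0
--     rows = [row[:m] for row in grid[:n]]
--     lines = rows + [list(col) for col in zip(*rows)]
--     return max((L for line in lines for L in _runs(line) if L >= 2), default=0)
-- ===== Notes on version B (the rewrite author's own statement) =====
-- stated objective: idiomatic
-- what changed: B replaces A's four index-driven counter-with-reset loops by a run-length decomposition: a helper extracts maximal runs of 1s from a 1D line by jumping run to run, applied to the sliced rows and to the columns obtained via zip(*rows), and the answer is max of the run lengths >= 2 with default 0.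
import Mathlib
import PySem

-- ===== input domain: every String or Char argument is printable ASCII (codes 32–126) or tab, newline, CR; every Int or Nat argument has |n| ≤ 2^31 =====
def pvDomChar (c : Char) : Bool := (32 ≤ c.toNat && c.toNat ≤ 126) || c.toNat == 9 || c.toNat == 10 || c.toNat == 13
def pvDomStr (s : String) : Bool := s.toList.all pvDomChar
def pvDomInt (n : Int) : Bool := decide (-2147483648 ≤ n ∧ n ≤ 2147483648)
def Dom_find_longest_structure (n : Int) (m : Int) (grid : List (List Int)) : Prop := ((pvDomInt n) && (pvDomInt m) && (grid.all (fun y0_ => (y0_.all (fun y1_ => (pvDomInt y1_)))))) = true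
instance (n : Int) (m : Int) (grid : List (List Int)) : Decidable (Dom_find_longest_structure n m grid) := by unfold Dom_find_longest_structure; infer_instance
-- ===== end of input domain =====

-- ===== PORT A =====
-- B differs from A by a run-length decomposition over rows and zip(*)-columns (idiomatic); A=B proved on Pre_.
-- pvStep / pvFlush are the body of A's inner loop and the after-loop flush, shared by all four loops of A.
def pvStep (st : Int × Int) (v : Int) : Int × Int :=
  if v = 1 then (st.1, st.2 + 1)
  else (if st.2 ≥ 2 then max st.1 st.2 else st.1, 0)

def pvFlush (st : Int × Int) : Int :=
  if st.2 ≥ 2 then max st.1 st.2 else st.1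

def find_longest_structure (n : Int) (m : Int) (grid : List (List Int)) : Int :=
  -- rows pass (accumulating max_length from 0), then columns pass continuing from it
  (PySem.List.pyRange 0 m 1).foldl
    (fun acc j => pvFlush ((PySem.List.pyRange 0 n 1).foldl
      (fun st i => pvStep st (PySem.List.pyGetD (PySem.List.pyGetD grid i []) j 0)) (acc, 0)))
    ((PySem.List.pyRange 0 n 1).foldl
      (fun acc i => pvFlush ((PySem.List.pyRange 0 m 1).foldl
        (fun st j => pvStep st (PySem.List.pyGetD (PySem.List.pyGetD grid i []) j 0)) (acc, 0))) 0)

-- ===== PORT B =====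
-- lengths of the maximal runs of 1s in a line (Source B's _runs: jump run to run;
-- the fuel argument only makes the jumping recursion structural, it never runs out)
def pvRunsF : Nat → List Int → List Int
  | 0, _ => []
  | _ + 1, [] => []
  | fuel + 1, x :: xs =>
    if x = 1 then (((xs.takeWhile (· == 1)).length : Int) + 1) :: pvRunsF fuel (xs.dropWhile (· == 1))
    else pvRunsF fuel xs

def pvRuns (l : List Int) : List Int := pvRunsF l.length l

def find_longest_structure_alt (n : Int) (m : Int) (grid : List (List Int)) : Int :=
  if n ≤ 0 ∨ m ≤ 0 then 0
  else
    let rows := (grid.take n.toNat).map (fun r => r.take m.toNat)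
    -- zip(*rows) ported as column extraction by index; exact when the rows are rectangular
    -- of width m, which Pre_ guarantees on this branch
    let cols := (List.range m.toNat).map (fun j => rows.map (fun r => r.getD j 0))
    PySem.List.maxD (((rows ++ cols).flatMap pvRuns).filter (fun L => decide (L ≥ 2)))
      (fun L => L) 0

-- ===== PRECONDITION & SPEC =====
-- Pre_ excludes exactly the inputs on which A raises IndexError: when both loops run
-- (0 < n and 0 < m), the grid must have at least n rows and each of its first n rows
-- at least m entries.
def Pre_find_longest_structure (n : Int) (m : Int) (grid : List (List Int)) : Prop :=
  0 < n → 0 < m →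
    (n ≤ (grid.length : Int) ∧ ∀ row ∈ grid.take n.toNat, m ≤ (row.length : Int))
instance (n : Int) (m : Int) (grid : List (List Int)) :
    Decidable (Pre_find_longest_structure n m grid) := by
  unfold Pre_find_longest_structure; infer_instance

def pvWitness_find_longest_structure : Int × Int × List (List Int) := (2, 2, [[1, 1], [1, 0]])

def Spec_find_longest_structure (n : Int) (m : Int) (grid : List (List Int)) (out : Int) : Prop := out = find_longest_structure_alt n m grid
instance (n : Int) (m : Int) (grid : List (List Int)) (out : Int) : Decidable (Spec_find_longest_structure n m grid out) := by unfold Spec_find_longest_structure; infer_instance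

-- ===== CLAIM (what is proved, stated in full; the proofs are below) =====
def Claim_equal_find_longest_structure : Prop := ∀ (n : Int) (m : Int) (grid : List (List Int)), Dom_find_longest_structure n m grid → Pre_find_longest_structure n m grid → Spec_find_longest_structure n m grid (find_longest_structure n m grid)

-- ===== LEMMAS AND PROOFS =====

theorem pvRunsF_fuel (f1 : Nat) (l : List Int) (f2 : Nat) (h1 : l.length ≤ f1)
    (h2 : l.length ≤ f2) : pvRunsF f1 l = pvRunsF f2 l := by
  induction f1 generalizing l f2 with
  | zero =>
    have : l = [] := by cases l <;> simp_all
    subst this; cases f2 <;> rfl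
  | succ f ih =>
    cases l with
    | nil => cases f2 <;> rfl
    | cons x xs =>
      cases f2 with
      | zero => simp at h2
      | succ g =>
        have hd := List.length_dropWhile_le (fun y : Int => y == 1) xs
        have hxx := ih (xs.dropWhile (· == 1)) g (by simp at h1 ⊢; omega)
          (by simp at h2 ⊢; omega)
        have hyy := ih xs g (by simp at h1 ⊢; omega) (by simp at h2 ⊢; omega)
        simp only [pvRunsF]
        by_cases hx : x = 1 <;> simp [hx, hxx, hyy]

theorem pvRuns_nil : pvRuns [] = [] := rfl

theorem pvRuns_cons (x : Int) (xs : List Int) :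
    pvRuns (x :: xs) =
      if x = 1 then (((xs.takeWhile (· == 1)).length : Int) + 1) :: pvRuns (xs.dropWhile (· == 1))
      else pvRuns xs := by
  show pvRunsF (xs.length + 1) (x :: xs) = _
  simp only [pvRunsF]
  by_cases hx : x = 1
  · simp only [hx, if_true]
    rw [pvRunsF_fuel xs.length (xs.dropWhile (· == 1)) (xs.dropWhile (· == 1)).length
        (List.length_dropWhile_le _ _) le_rfl]
    simp [pvRuns]
  · simp only [if_neg hx]
    rfl

-- A's per-line pass: inner loop from state (acc, 0), then the flush after the loop
def pvLineA (acc : Int) (line : List Int) : Int := pvFlush (line.foldl pvStep (acc, 0))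

-- B's per-line value: largest qualifying run length of the line (0 if none)
def pvBest (line : List Int) : Int :=
  ((pvRuns line).filter (fun L => decide (L ≥ 2))).foldl max 0

def pvBestAll (lines : List (List Int)) : Int :=
  ((lines.flatMap pvRuns).filter (fun L => decide (L ≥ 2))).foldl max 0

theorem pvBest_nonneg (line : List Int) : 0 ≤ pvBest line :=
  (PySem.List.le_foldl_max _ 0).1

theorem foldl_pvStep_ones (l : List Int) (h : ∀ x ∈ l, x = 1) (acc c : Int) :
    l.foldl pvStep (acc, c) = (acc, c + l.length) := by
  induction l generalizing c with
  | nil => simp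
  | cons x xs ih =>
    have hx : x = 1 := h x (by simp)
    have := ih (fun y hy => h y (by simp [hy])) (c + 1)
    simp [pvStep, hx, this]
    omega

theorem pvLineA_eq (line : List Int) (acc : Int) (h : 0 ≤ acc) :
    pvLineA acc line = max acc (pvBest line) := by
  match line with
  | [] =>
    simp only [pvLineA, List.foldl_nil, pvFlush, pvBest, pvRuns_nil, List.filter_nil,
      List.foldl_nil]
    norm_num
    exact h
  | x :: xs =>
    by_cases hx : x = 1
    · subst hx
      have hxs : xs.takeWhile (· == 1) ++ xs.dropWhile (· == 1) = xs :=
        List.takeWhile_append_dropWhile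
      have hones : ∀ y ∈ xs.takeWhile (· == 1), y = 1 := by
        intro y hy
        have := List.mem_takeWhile_imp hy
        simpa using this
      set t := xs.takeWhile (· == 1) with ht
      set d := xs.dropWhile (· == 1) with hd
      set k : Int := (t.length : Int) + 1 with hk
      have hk1 : 1 ≤ k := by omega
      have hfold : (1 :: xs).foldl pvStep (acc, 0) = d.foldl pvStep (acc, k) := by
        rw [List.foldl_cons, show pvStep (acc, 0) 1 = (acc, 1) from by simp [pvStep],
          ← hxs, List.foldl_append, foldl_pvStep_ones t hones acc 1]
        rw [show (1 : Int) + t.length = k from by omega]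
      have hruns : pvRuns (1 :: xs) = k :: pvRuns d := by
        rw [pvRuns_cons]; simp [← ht, ← hd, ← hk]
      cases hD : d with
      | nil =>
        rw [pvLineA, hfold, hD, List.foldl_nil, pvFlush, pvBest, hruns, hD, pvRuns_nil]
        by_cases h2 : k ≥ 2
        · rw [if_pos h2]
          simp only [List.filter_cons, List.filter_nil, decide_eq_true_eq, if_pos h2]
          rw [List.foldl_cons, List.foldl_nil, max_eq_right (by omega : (0:Int) ≤ k)]
        · rw [if_neg h2]
          simp only [List.filter_cons, List.filter_nil, decide_eq_true_eq, if_neg h2]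
          rw [List.foldl_nil, max_eq_left h]
      | cons y ys =>
        have hy : ¬ (y = 1) := by
          have hDW : xs.dropWhile (· == 1) = y :: ys := hd.symm.trans hD
          have hne : xs.dropWhile (· == 1) ≠ [] := by simp [hDW]
          have h3 := List.head_dropWhile_not (fun z : Int => z == 1) hne
          simp [hDW] at h3
          exact h3
        have hlen : ys.length < (1 :: xs).length := by
          have := congrArg List.length hxs
          simp [hD] at this
          simp; omega
        have hstep : pvStep (acc, k) y = (if k ≥ 2 then max acc k else acc, 0) := by
          simp [pvStep, hy]
        have hacc' : 0 ≤ (if k ≥ 2 then max acc k else acc) := by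
          split <;> [exact le_trans h (le_max_left _ _); exact h]
        have hrec := pvLineA_eq ys (if k ≥ 2 then max acc k else acc) hacc'
        have hLHS : pvLineA acc (1 :: xs) = pvLineA (if k ≥ 2 then max acc k else acc) ys := by
          rw [pvLineA, hfold, hD, List.foldl_cons, hstep, pvLineA]
        have hrunsd : pvRuns d = pvRuns ys := by
          rw [hD, pvRuns_cons, if_neg hy]
        rw [hLHS, hrec]
        simp only [pvBest]
        rw [hruns, hrunsd, List.filter_cons]
        by_cases h2 : k ≥ 2
        · rw [if_pos h2, if_pos (by simpa using h2), List.foldl_cons,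
            max_eq_right (by omega : (0:Int) ≤ k),
            show ∀ l : List Int, l.foldl max k = l.foldl max (max k 0) from
              fun l => by rw [max_eq_left (by omega : (0:Int) ≤ k)],
            List.foldl_assoc, max_assoc]
        · rw [if_neg h2, if_neg (by simpa using h2)]
    · have hstep : pvStep (acc, 0) x = (acc, 0) := by simp [pvStep, hx]
      have hrec := pvLineA_eq xs acc h
      rw [pvLineA, List.foldl_cons, hstep, ← pvLineA, hrec]
      simp only [pvBest]
      rw [pvRuns_cons, if_neg hx]
termination_by line.length
decreasing_by
  · exact hlen
  · simp

theorem foldl_pvLineA_eq (lines : List (List Int)) (acc : Int) (h : 0 ≤ acc) :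
    lines.foldl pvLineA acc = max acc (pvBestAll lines) := by
  induction lines generalizing acc with
  | nil =>
    simp [pvBestAll]
    omega
  | cons l ls ih =>
    have h1 : 0 ≤ pvLineA acc l := by
      rw [pvLineA_eq l acc h]; exact le_trans h (le_max_left _ _)
    rw [List.foldl_cons, ih _ h1, pvLineA_eq l acc h]
    have : pvBestAll (l :: ls) = max (pvBest l) (pvBestAll ls) := by
      unfold pvBestAll
      rw [List.flatMap_cons, List.filter_append, List.foldl_append,
        show ((pvRuns l).filter (fun L => decide (L ≥ 2))).foldl max 0
            = max (((pvRuns l).filter (fun L => decide (L ≥ 2))).foldl max 0) 0 from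
          (max_eq_left (pvBest_nonneg l)).symm,
        List.foldl_assoc]
      rfl
    rw [this, max_assoc]

-- fold over range(n) indexing xs = fold over the first n elements of xs
theorem foldl_pyRange_take {α β : Type} (xs : List α) (d : α) (f : β → α → β) (init : β)
    (n : Int) (h : n ≤ (xs.length : Int)) :
    (PySem.List.pyRange 0 n 1).foldl (fun acc i => f acc (PySem.List.pyGetD xs i d)) init
      = (xs.take n.toNat).foldl f init := by
  have hlen : ((xs.take n.toNat).length : Int) = max n 0 := by
    simp [List.length_take]; omega
  rcases le_or_gt n 0 with hn | hn
  · rw [PySem.List.pyRange_one_eq_nil hn, List.foldl_nil,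
      show n.toNat = 0 from by omega, List.take_zero, List.foldl_nil]
  · rw [PySem.List.foldl_congr_mem _ _
        (fun acc i => f acc (PySem.List.pyGetD (xs.take n.toNat) i d)) init ?_]
    · rw [show PySem.List.pyRange 0 n 1
            = PySem.List.pyRange 0 ((xs.take n.toNat).length : Int) 1 from by
          rw [hlen, max_eq_left (by omega)]]
      exact PySem.List.foldl_pyRange_zero_pyGetD' _ _ _ _
    · intro acc i hi
      rcases PySem.List.mem_pyRange_one.1 hi with ⟨hi0, hin⟩
      have hix : i < (xs.length : Int) := lt_of_lt_of_le hin h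
      have hit : i < ((xs.take n.toNat).length : Int) := by omega
      show f acc (PySem.List.pyGetD xs i d) = f acc (PySem.List.pyGetD (xs.take n.toNat) i d)
      rw [PySem.List.pyGetD_eq_getElem xs d hi0 hix,
        PySem.List.pyGetD_eq_getElem (xs.take n.toNat) d hi0 hit, List.getElem_take]

theorem pvMaxD_eq_foldl (l : List Int) (h : ∀ x ∈ l, 0 ≤ x) :
    PySem.List.maxD l (fun x => x) 0 = l.foldl max 0 := by
  cases l with
  | nil => rfl
  | cons x t =>
    have hx : 0 ≤ x := h x (by simp)
    unfold PySem.List.maxD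
    rw [PySem.List.max?_id_cons, Option.getD_some, List.foldl_cons,
      max_eq_right hx]

-- ===== VERDICT (by name: the statement is the Claim_ definition above) =====
theorem find_longest_structure_spec : Claim_equal_find_longest_structure := by
  intro n m grid _ hpre
  unfold Spec_find_longest_structure find_longest_structure find_longest_structure_alt
  by_cases hnm : n ≤ 0 ∨ m ≤ 0
  · rw [if_pos hnm]
    rcases hnm with hn | hm
    · rw [PySem.List.pyRange_one_eq_nil hn]
      simp only [List.foldl_nil]
      rw [PySem.List.foldl_congr_mem _ _ (fun acc _ => acc) 0
          (fun acc j _ => by simp [pvFlush]), List.foldl_fixed]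
    · rw [PySem.List.pyRange_one_eq_nil hm]
      simp only [List.foldl_nil]
      rw [PySem.List.foldl_congr_mem _ _ (fun acc _ => acc) 0
          (fun acc i _ => by simp [pvFlush]), List.foldl_fixed]
  · have hn : 0 < n := by omega
    have hm : 0 < m := by omega
    rw [if_neg (by omega)]
    obtain ⟨hglen, hrows⟩ := hpre hn hm
    set G := grid.take n.toNat with hG
    have hGlen : G.length = n.toNat := by
      simp [hG, List.length_take]; omega
    set rows := G.map (fun r => r.take m.toNat) with hRows
    set cols := (List.range m.toNat).map (fun j => rows.map (fun r => r.getD j 0)) with hCols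
    have hrowslen : rows.length = n.toNat := by simp [hRows, hGlen]
    have hrowlen : ∀ r ∈ G, m ≤ (r.length : Int) := hrows
    -- the row pass of A
    have hrowpass : ∀ init : Int,
        (PySem.List.pyRange 0 n 1).foldl
          (fun acc i => pvFlush ((PySem.List.pyRange 0 m 1).foldl
            (fun st j => pvStep st (PySem.List.pyGetD (PySem.List.pyGetD grid i []) j 0))
            (acc, 0))) init
        = rows.foldl pvLineA init := by
      intro init
      rw [foldl_pyRange_take grid ([] : List Int)
          (fun acc row => pvFlush ((PySem.List.pyRange 0 m 1).foldl
            (fun st j => pvStep st (PySem.List.pyGetD row j 0)) (acc, 0))) init n hglen]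
      rw [hRows, List.foldl_map, ← hG]
      apply PySem.List.foldl_congr_mem
      intro acc r hr
      have hrl : m ≤ (r.length : Int) := hrows r hr
      rw [foldl_pyRange_take r 0 pvStep (acc, 0) m hrl]
      rfl
    -- the column pass of A
    have hcolpass : ∀ init : Int,
        (PySem.List.pyRange 0 m 1).foldl
          (fun acc j => pvFlush ((PySem.List.pyRange 0 n 1).foldl
            (fun st i => pvStep st (PySem.List.pyGetD (PySem.List.pyGetD grid i []) j 0))
            (acc, 0))) init
        = cols.foldl pvLineA init := by
      intro init
      rw [PySem.List.pyRange_one 0 m]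
      simp only [zero_add, Int.sub_zero]
      rw [List.foldl_map, hCols, List.foldl_map]
      apply PySem.List.foldl_congr_mem
      intro acc k hk
      have hkm : k < m.toNat := List.mem_range.mp hk
      have hinner :
          (PySem.List.pyRange 0 n 1).foldl
            (fun st i => pvStep st (PySem.List.pyGetD
              (PySem.List.pyGetD grid i []) (k : Int) 0)) ((acc, 0) : Int × Int)
          = rows.foldl (fun st r => pvStep st (r.getD k 0)) ((acc, 0) : Int × Int) := by
        rw [PySem.List.foldl_congr_mem _ _
            (fun st i => pvStep st ((PySem.List.pyGetD rows i ([] : List Int)).getD k 0))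
            ((acc, 0) : Int × Int) ?_]
        · rw [foldl_pyRange_take rows ([] : List Int)
              (fun st r => pvStep st (r.getD k 0)) ((acc, 0) : Int × Int) n
              (by rw [hrowslen]; omega)]
          rw [List.take_of_length_le (by rw [hrowslen])]
        · intro st i hi
          rcases PySem.List.mem_pyRange_one.1 hi with ⟨hi0, hin⟩
          have hig : i < (grid.length : Int) := lt_of_lt_of_le hin hglen
          have hir : i < (rows.length : Int) := by rw [hrowslen]; omega
          show pvStep st (PySem.List.pyGetD (PySem.List.pyGetD grid i []) (k : Int) 0)
              = pvStep st ((PySem.List.pyGetD rows i ([] : List Int)).getD k 0)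
          rw [PySem.List.pyGetD_eq_getElem grid [] hi0 hig,
              PySem.List.pyGetD_eq_getElem rows ([] : List Int) hi0 hir]
          have hmemG : grid[i.toNat] ∈ G := by
            rw [hG]
            have hlt : i.toNat < (grid.take n.toNat).length := by
              rw [show (grid.take n.toNat) = G from rfl, hGlen]; omega
            have hge : (grid.take n.toNat)[i.toNat] = grid[i.toNat] := List.getElem_take
            rw [← hge]
            exact List.getElem_mem hlt
          have hlrow : m ≤ (grid[i.toNat].length : Int) := hrows _ hmemG
          have hkl : k < grid[i.toNat].length := by omega
          have hr2 : k < (rows[i.toNat]'(by omega)).length := by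
            simp only [hRows, List.getElem_map, List.length_take]
            simp only [hG, List.getElem_take]
            omega
          simp only [PySem.List.pyGetD_natCast]
          congr 1
          rw [List.getD_eq_getElem _ 0 hkl, List.getD_eq_getElem _ 0 hr2]
          simp only [hRows, List.getElem_map, List.getElem_take]
          simp only [hG, List.getElem_take]
      rw [hinner]
      simp only [pvLineA, hRows, List.foldl_map]
    rw [hrowpass 0, hcolpass (rows.foldl pvLineA 0), ← List.foldl_append,
      foldl_pvLineA_eq _ 0 le_rfl]
    rw [pvMaxD_eq_foldl _ (fun x hx => by
      rcases List.mem_filter.1 hx with ⟨_, hx2⟩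
      simp at hx2
      omega)]
    rw [max_eq_right (by exact (PySem.List.le_foldl_max _ 0).1)]
    rfl
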